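-- pv_equiv track=rewrite | github.com/noelpat/Harvard-CS50x-2018-Psets | pset6/similarities/helpers.py | trimSub
-- ===== SOURCE A (Python) =====
-- def trimSub(string, n):
--     l = len(string)
--     sub = [string[i:j+1] for i in range(l) for j in range(i, l)]
--     trim = []
--     count = 0
--     for i in sub:
--         if len(sub[count]) == n:
--             trim.append(sub[count])
--         count += 1
--     return trim
-- ===== SOURCE B (Python) =====
-- def trimSub(string, n):
--     # n-gram zip idiom: n shifted suffix views zipped in lockstep
--     if n > len(string):
--         return []
--     return ["".join(t) for t in zip(*(string[k:] for k in range(n)))]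
-- ===== Notes on version B (the rewrite author's own statement) =====
-- stated objective: faster
-- what changed: B zips n shifted suffix views of the string in lockstep (the n-gram zip idiom) instead of materialising every substring of every length and filtering by length.
import Mathlib
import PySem

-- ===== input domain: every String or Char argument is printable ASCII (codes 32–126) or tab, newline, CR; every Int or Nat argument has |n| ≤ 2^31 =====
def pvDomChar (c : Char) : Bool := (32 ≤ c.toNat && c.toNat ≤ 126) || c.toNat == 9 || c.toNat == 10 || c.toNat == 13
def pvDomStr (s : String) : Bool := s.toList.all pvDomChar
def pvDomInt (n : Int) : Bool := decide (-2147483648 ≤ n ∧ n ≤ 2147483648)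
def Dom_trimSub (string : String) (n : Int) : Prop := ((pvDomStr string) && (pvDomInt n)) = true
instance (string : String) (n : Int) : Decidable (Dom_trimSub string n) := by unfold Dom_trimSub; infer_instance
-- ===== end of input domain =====

-- B replaces A's "generate every substring, then filter by length" with the idiomatic
-- n-gram zip of n shifted suffix views; same return value, far less intermediate data.

-- ===== PORT A =====
-- A: list every substring string[i:j+1], then keep those of length n (indexing sub[count] in the loop).
def trimSub (string : String) (n : Int) : List String :=
  let s := string.toList
  let l : Int := s.length
  let sub : List (List Char) :=
    (PySem.List.pyRange 0 l 1).flatMap (fun i =>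
      (PySem.List.pyRange i l 1).map (fun j => PySem.List.slice s (some i) (some (j + 1))))
  let r :=
    sub.foldl (fun (st : List (List Char) × Int) i =>
      let e := (PySem.List.pyGet? sub st.2).getD i   -- sub[count]; count is always a valid index
      (if ((e.length : Int) == n) then st.1 ++ [e] else st.1, st.2 + 1)) ([], 0)
  r.1.map (fun cs => String.ofList cs)

-- ===== PORT B =====
-- Python's zip(*iters): advance all lists in lockstep until one is exhausted.
def pvZipN (ls : List (List Char)) : List (List Char) :=
  match ls with
  | [] => []
  | l :: rest =>
      if (l :: rest).any List.isEmpty then []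
      else ((l :: rest).map (fun t => t.headD ' ')) :: pvZipN ((l :: rest).map List.tail)
termination_by (ls.headD []).length
decreasing_by
  simp only [List.headD_cons, List.map_cons, List.any_cons, Bool.or_eq_true] at *
  cases l with
  | nil => simp_all
  | cons c t => simp

-- B: if n exceeds the length there are no windows; else zip the n shifted
-- suffixes string[k:] and join each tuple of chars.
def trimSub_alt (string : String) (n : Int) : List String :=
  let s := string.toList
  if PySem.Str.len string < n then []
  else
    let shifts : List (List Char) :=
      (PySem.List.pyRange 0 n 1).map (fun k => PySem.List.slice s (some k) none)
    (pvZipN shifts).map (fun t => String.ofList t)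

-- ===== PRECONDITION & SPEC =====
def Spec_trimSub (string : String) (n : Int) (out : List String) : Prop := out = trimSub_alt string n
instance (string : String) (n : Int) (out : List String) : Decidable (Spec_trimSub string n out) := by unfold Spec_trimSub; infer_instance

-- ===== CLAIM (what is proved, stated in full; the proofs are below) =====
def Claim_equal_trimSub : Prop := ∀ (string : String) (n : Int), Dom_trimSub string n → Spec_trimSub string n (trimSub string n)


-- ===== LEMMAS AND PROOFS =====

lemma pv_loopA (n : Int) (full : List (List Char)) :
    ∀ (post pre acc : List (List Char)), pre ++ post = full →
    (post.foldl (fun (st : List (List Char) × Int) i =>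
        (if ((((PySem.List.pyGet? full st.2).getD i).length : Int) == n) then
            st.1 ++ [(PySem.List.pyGet? full st.2).getD i]
          else st.1, st.2 + 1))
      (acc, (pre.length : Int))).1
    = acc ++ post.filter (fun x => ((x.length : Int) == n)) := by
  intro post
  induction post with
  | nil => intro pre acc h; simp
  | cons x post' ih =>
    intro pre acc h
    have hget : PySem.List.pyGet? full (pre.length : Int) = some x := by
      rw [PySem.List.pyGet?_natCast, ← h]; simp
    have hlen : (pre.length : Int) + 1 = ((pre ++ [x]).length : Int) := by simp
    simp only [List.foldl_cons, hget, Option.getD_some, hlen]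
    by_cases hp : ((x.length : Int) == n) = true
    · rw [if_pos hp, ih (pre ++ [x]) (acc ++ [x]) (by simp [← h])]
      simp [hp]
    · rw [if_neg (by simp_all), ih (pre ++ [x]) acc (by simp [← h])]
      simp [hp]
lemma pv_filter_eq_pyRange (b : Int) : ∀ (a c : Int),
    (PySem.List.pyRange a b 1).filter (fun j => j == c)
      = if a ≤ c ∧ c < b then [c] else [] := by
  intro a c
  induction hh : (b - a).toNat generalizing a with
  | zero =>
    rw [PySem.List.pyRange_one_eq_nil (by omega)]
    simp; omega
  | succ k ih =>
    rw [PySem.List.pyRange_one_cons (by omega), List.filter_cons]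
    by_cases hac : a = c
    · subst hac
      rw [ih (a+1) (by omega)]
      simp only [beq_self_eq_true, if_true]
      rw [if_neg (by omega), if_pos ⟨le_rfl, by omega⟩]
    · rw [if_neg (by simp [hac]), ih (a+1) (by omega)]
      split_ifs with h1 h2 h2 <;> first | rfl | omega
lemma pv_inner (s : List Char) (n i : Int) (hn : 1 ≤ n) (h0 : 0 ≤ i) (hil : i < (s.length : Int)) :
    ((PySem.List.pyRange i (s.length : Int) 1).map
        (fun j => PySem.List.slice s (some i) (some (j + 1)))).filter
      (fun x => ((x.length : Int) == n))
    = if i + n ≤ (s.length : Int) then [PySem.List.slice s (some i) (some (i + n))] else [] := by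
  rw [List.filter_map]
  have hcong : ∀ j ∈ PySem.List.pyRange i (s.length : Int) 1,
      ((fun x => ((x.length : Int) == n)) ∘ (fun j => PySem.List.slice s (some i) (some (j + 1)))) j
        = (fun j => j == i + n - 1) j := by
    intro j hj
    rw [PySem.List.mem_pyRange_one] at hj
    simp only [Function.comp_apply]
    rw [PySem.List.slice_toNat s h0 (by omega)]
    simp only [List.length_take, List.length_drop]
    have h1 : ((min ((j+1).toNat - i.toNat) (s.length - i.toNat) : Nat) : Int) = j + 1 - i := by omega
    rw [h1, Bool.eq_iff_iff]
    simp only [beq_iff_eq]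
    omega
  rw [List.filter_congr hcong, pv_filter_eq_pyRange]
  split_ifs with h1 h2 h2
  · have he : i + n - 1 + 1 = i + n := by omega
    simp only [List.map_cons, List.map_nil, he]
  · exfalso; omega
  · exfalso; omega
  · rfl
lemma pv_subNorm (s : List Char) (n : Int) (hn : 1 ≤ n) :
    ((PySem.List.pyRange 0 (s.length : Int) 1).flatMap
      (fun i => if i + n ≤ (s.length : Int) then [PySem.List.slice s (some i) (some (i + n))] else []))
    = (PySem.List.pyRange 0 ((s.length : Int) - n + 1) 1).map
        (fun i => PySem.List.slice s (some i) (some (i + n))) := by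
  by_cases hnl : n ≤ (s.length : Int)
  · rw [PySem.List.pyRange_one_append 0 ((s.length : Int) - n + 1) (s.length : Int) (by omega) (by omega)]
    rw [List.flatMap_append]
    have h1 : ((PySem.List.pyRange 0 ((s.length : Int) - n + 1) 1).flatMap
        (fun i => if i + n ≤ (s.length : Int) then [PySem.List.slice s (some i) (some (i + n))] else []))
        = (PySem.List.pyRange 0 ((s.length : Int) - n + 1) 1).flatMap
            (fun i => [PySem.List.slice s (some i) (some (i + n))]) := by
      simp only [List.flatMap_def]
      congr 1
      apply List.map_congr_left
      intro i hi
      rw [PySem.List.mem_pyRange_one] at hi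
      rw [if_pos (by omega)]
    have h2 : ((PySem.List.pyRange ((s.length : Int) - n + 1) (s.length : Int) 1).flatMap
        (fun i => if i + n ≤ (s.length : Int) then [PySem.List.slice s (some i) (some (i + n))] else [])) = [] := by
      rw [List.flatMap_eq_nil_iff]
      intro xs hxs
      rw [PySem.List.mem_pyRange_one] at hxs
      rw [if_neg (by omega)]
    rw [h1, h2, List.append_nil, ← List.map_eq_flatMap]
  · rw [PySem.List.pyRange_one_eq_nil (show (s.length : Int) - n + 1 ≤ 0 by omega)]
    simp only [List.map_nil]
    rw [List.flatMap_eq_nil_iff]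
    intro xs hxs
    rw [PySem.List.mem_pyRange_one] at hxs
    rw [if_neg (by omega)]
lemma pv_heads (s : List Char) (m : Nat) (h : m ≤ s.length) :
    (List.range m).map (fun k => (s.drop k).headD ' ') = s.take m := by
  induction m with
  | zero => simp
  | succ m ih =>
    rw [List.range_succ, List.map_append, ih (by omega), List.take_add_one]
    simp only [List.map_cons, List.map_nil]
    congr 1
    have hm : m < s.length := by omega
    rw [List.headD_eq_head?_getD, List.head?_drop]
    simp [List.getElem?_eq_getElem hm]

lemma pv_zipN_shifts (m : Nat) (hm : 1 ≤ m) :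
    ∀ (s : List Char),
      pvZipN ((List.range m).map (fun k => s.drop k))
        = (List.range (s.length + 1 - m)).map (fun i => (s.drop i).take m) := by
  intro s
  induction s with
  | nil =>
    obtain ⟨m', rfl⟩ : ∃ m', m = m' + 1 := ⟨m - 1, by omega⟩
    rw [List.range_succ_eq_map, List.map_cons]
    rw [pvZipN]
    simp
  | cons c t ih =>
    obtain ⟨m', hme⟩ : ∃ m', m = m' + 1 := ⟨m - 1, by omega⟩
    have hcons : (List.range m).map (fun k => (c :: t).drop k)
        = (List.drop 0 (c :: t)) :: ((List.range m').map Nat.succ).map (fun k => (c :: t).drop k) := by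
      rw [hme, List.range_succ_eq_map, List.map_cons, List.map_map]
    rw [hcons, pvZipN, ← hcons]
    by_cases hL : (c :: t).length < m
    · rw [if_pos ?side]
      · have : (c :: t).length + 1 - m = 0 := by omega
        rw [this]; simp
      · rw [List.any_eq_true]
        refine ⟨(c :: t).drop (m - 1), List.mem_map.mpr ⟨m - 1, by simp [List.mem_range]; omega, rfl⟩, ?_⟩
        simp only [List.isEmpty_iff, List.drop_eq_nil_iff]
        omega
    · rw [if_neg ?side2]
      · -- heads and tails
        have htails : ((List.range m).map (fun k => (c :: t).drop k)).map List.tail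
            = (List.range m).map (fun k => t.drop k) := by
          rw [List.map_map]
          apply List.map_congr_left
          intro k hk
          simp only [Function.comp_apply, List.tail_drop, List.drop_succ_cons]
        have hheads : ((List.range m).map (fun k => (c :: t).drop k)).map (fun t => t.headD ' ')
            = (c :: t).take m := by
          rw [List.map_map]
          exact pv_heads _ m (by omega)
        rw [htails, hheads, ih]
        have hlen : (c :: t).length + 1 - m = (t.length + 1 - m) + 1 := by
          simp only [List.length_cons] at hL ⊢; omega
        rw [hlen, List.range_succ_eq_map, List.map_cons, List.map_map]
        simp only [List.drop_zero]
        congr 1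
      · rw [Bool.not_eq_true, List.any_eq_false]
        intro x hx
        rw [List.mem_map] at hx
        obtain ⟨k, hk, rfl⟩ := hx
        rw [List.mem_range] at hk
        simp only [List.length_cons] at hL
        simp only [List.isEmpty_iff, List.drop_eq_nil_iff, List.length_cons]
        omega

-- ===== VERDICT (by name: the statement is the Claim_ definition above) =====
theorem trimSub_spec : Claim_equal_trimSub := by
  intro string n _
  unfold Spec_trimSub
  simp only [trimSub, trimSub_alt, PySem.Str.len_eq]
  set s : List Char := string.toList with hs
  set sub : List (List Char) :=
    (PySem.List.pyRange 0 (s.length : Int) 1).flatMap (fun i =>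
      (PySem.List.pyRange i (s.length : Int) 1).map (fun j => PySem.List.slice s (some i) (some (j + 1)))) with hsub
  have hA : (sub.foldl (fun (st : List (List Char) × Int) i =>
      (if ((((PySem.List.pyGet? sub st.2).getD i).length : Int) == n) then
          st.1 ++ [(PySem.List.pyGet? sub st.2).getD i]
        else st.1, st.2 + 1)) ([], 0)).1
      = sub.filter (fun x => ((x.length : Int) == n)) := by
    simpa using pv_loopA n sub sub [] [] rfl
  rw [hA, hsub, List.filter_flatMap]
  by_cases hn : 1 ≤ n
  · have h1 : (PySem.List.pyRange 0 (s.length : Int) 1).flatMap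
        (fun i => ((PySem.List.pyRange i (s.length : Int) 1).map
            (fun j => PySem.List.slice s (some i) (some (j + 1)))).filter (fun x => ((x.length : Int) == n)))
        = (PySem.List.pyRange 0 (s.length : Int) 1).flatMap
          (fun i => if i + n ≤ (s.length : Int) then [PySem.List.slice s (some i) (some (i + n))] else []) := by
      simp only [List.flatMap_def]
      congr 1
      apply List.map_congr_left
      intro i hi
      rw [PySem.List.mem_pyRange_one] at hi
      exact pv_inner s n i hn hi.1 hi.2
    rw [h1, pv_subNorm s n hn]
    by_cases hle : n ≤ (s.length : Int)
    case neg =>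
      rw [if_pos (by omega), PySem.List.pyRange_one_eq_nil (by omega)]
      rfl
    rw [if_neg (by omega)]
    congr 1
    -- A side is now a map over pyRange; normalise to List.range of drop/take
    have hAfin : (PySem.List.pyRange 0 ((s.length : Int) - n + 1) 1).map
        (fun i => PySem.List.slice s (some i) (some (i + n)))
        = (List.range (s.length + 1 - n.toNat)).map (fun i => (s.drop i).take n.toNat) := by
      rw [PySem.List.pyRange_one, List.map_map]
      have hcnt : ((s.length : Int) - n + 1 - 0).toNat = s.length + 1 - n.toNat := by omega
      rw [hcnt]
      apply List.map_congr_left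
      intro k hk
      simp only [Function.comp_apply, zero_add]
      rw [PySem.List.slice_toNat s (by omega) (by omega)]
      congr 1
      omega
    -- B side
    have hshift : (PySem.List.pyRange 0 n 1).map (fun k => PySem.List.slice s (some k) none)
        = (List.range n.toNat).map (fun k => s.drop k) := by
      rw [PySem.List.pyRange_one, List.map_map]
      have hcnt : ((n : Int) - 0).toNat = n.toNat := by omega
      rw [hcnt]
      apply List.map_congr_left
      intro k hk
      simp only [Function.comp_apply, zero_add]
      rw [PySem.List.slice_from s (by omega)]
      simp
    rw [hAfin, hshift, pv_zipN_shifts n.toNat (by omega) s]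
  · -- n < 1: no substring has length n
    rw [if_neg (by omega)]
    congr 1
    have hB : (PySem.List.pyRange 0 n 1).map (fun k => PySem.List.slice s (some k) none) = [] := by
      rw [PySem.List.pyRange_one_eq_nil (by omega)]
      rfl
    rw [hB]
    have hZ : pvZipN [] = [] := by rw [pvZipN]
    rw [hZ]
    rw [List.flatMap_eq_nil_iff]
    intro xs hxs
    rw [PySem.List.mem_pyRange_one] at hxs
    rw [List.filter_eq_nil_iff]
    intro x hx
    rw [List.mem_map] at hx
    obtain ⟨j, hj, rfl⟩ := hx
    rw [PySem.List.mem_pyRange_one] at hj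
    rw [PySem.List.slice_toNat s (by omega) (by omega)]
    simp only [List.length_take, List.length_drop, beq_iff_eq]
    omega
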